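-- pv_equiv track=rewrite | github.com/wenruo0522/UCB-CS61A | solutions/homework/homework03/hw03.py | digit_distance
-- ===== SOURCE A (Python) =====
-- def digit_distance(n):
--     """Determines the digit distance of n.
--
--     >>> digit_distance(3)
--     0
--     >>> digit_distance(777)
--     0
--     >>> digit_distance(314)
--     5
--     >>> digit_distance(31415926535)
--     32
--     >>> digit_distance(3464660003)
--     16
--     >>> from construct_check import check
--     >>> # ban all loops
--     >>> check(HW_SOURCE_FILE, 'digit_distance',
--     ...       ['For', 'While'])
--     True
--     """
--     "*** YOUR CODE HERE ***"
--     if n < 10: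
--         return 0
--     else:
--         rest_but_last, last = n // 10, n % 10
--         if rest_but_last < 10:
--             return abs(rest_but_last - last) + digit_distance(rest_but_last)
--         else:
--             return abs(rest_but_last % 10 - last) + digit_distance(rest_but_last)
-- ===== SOURCE B (Python) =====
-- def digit_distance(n):
--     if n < 10:
--         return 0
--     s = str(n)
--     return sum(abs(ord(a) - ord(b)) for a, b in zip(s, s[1:]))
-- ===== Notes on version B (the rewrite author's own statement) =====
-- stated objective: idiomatic
-- what changed: Replaces the recursive //,% digit extraction with a single string pass summing abs differences of adjacent character codes of str(n).
import Mathlib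
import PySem

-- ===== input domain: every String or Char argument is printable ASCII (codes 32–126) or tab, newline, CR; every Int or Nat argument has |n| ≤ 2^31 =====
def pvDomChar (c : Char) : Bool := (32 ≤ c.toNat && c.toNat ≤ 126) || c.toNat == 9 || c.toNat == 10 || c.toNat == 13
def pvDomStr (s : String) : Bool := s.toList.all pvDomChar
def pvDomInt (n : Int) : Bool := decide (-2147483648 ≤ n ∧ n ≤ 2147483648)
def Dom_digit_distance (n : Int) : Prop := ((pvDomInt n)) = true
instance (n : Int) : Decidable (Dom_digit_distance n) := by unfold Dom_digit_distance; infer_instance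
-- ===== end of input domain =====

-- B replaces A's recursive //,% digit extraction with a single pass over adjacent characters of str(n).

-- ===== PORT A =====
def digit_distance (n : Int) : Int :=
  if _h : n < 10 then 0
  else
    let rest_but_last := PySem.Int.floordiv n 10
    let last := PySem.Int.mod n 10
    if rest_but_last < 10 then
      |rest_but_last - last| + digit_distance rest_but_last
    else
      |PySem.Int.mod rest_but_last 10 - last| + digit_distance rest_but_last
termination_by n.toNat
decreasing_by
  all_goals
    simp only [PySem.Int.floordiv_eq_ediv_of_pos (by norm_num : (0:Int) < 10)]
    omega

-- ===== PORT B =====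
-- abs(ord a - ord b) ports exactly as |a.toNat - b.toNat| on Int
def digit_distance_alt (n : Int) : Int :=
  if n < 10 then 0
  else
    let s := PySem.Int.toChars n   -- str(n)
    (s.zip s.tail).foldl (fun acc p => acc + |(p.1.toNat : Int) - (p.2.toNat : Int)|) 0

-- ===== PRECONDITION & SPEC =====
def Spec_digit_distance (n : Int) (out : Int) : Prop := out = digit_distance_alt n
instance (n : Int) (out : Int) : Decidable (Spec_digit_distance n out) := by unfold Spec_digit_distance; infer_instance

-- ===== CLAIM (what is proved, stated in full; the proofs are below) =====
def Claim_equal_digit_distance : Prop := ∀ (n : Int), Dom_digit_distance n → Spec_digit_distance n (digit_distance n)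

-- ===== LEMMAS AND PROOFS =====

/-- Sum of abs differences of adjacent character codes, recursively. -/
def pairSumR : List Char → Int
  | a :: b :: t => |(a.toNat : Int) - (b.toNat : Int)| + pairSumR (b :: t)
  | _ => 0

lemma foldl_pairSumR (cs : List Char) (acc : Int) :
    (cs.zip cs.tail).foldl (fun acc p => acc + |(p.1.toNat : Int) - (p.2.toNat : Int)|) acc
      = acc + pairSumR cs := by
  induction cs generalizing acc with
  | nil => simp [pairSumR]
  | cons a t ih =>
    cases t with
    | nil => simp [pairSumR]
    | cons b t' =>
      simp only [List.tail_cons, List.zip_cons_cons, List.foldl_cons] at *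
      rw [ih]
      simp [pairSumR]; ring

lemma pairSumR_append (xs : List Char) (l c : Char) (hx : xs.getLast? = some l) :
    pairSumR (xs ++ [c]) = pairSumR xs + |(l.toNat : Int) - (c.toNat : Int)| := by
  induction xs with
  | nil => simp at hx
  | cons a t ih =>
    cases t with
    | nil =>
      simp only [List.getLast?_singleton, Option.some.injEq] at hx
      subst hx
      simp [pairSumR]
    | cons b t' =>
      have hx' : (b :: t').getLast? = some l := by
        simpa [List.getLast?_cons_cons] using hx
      have := ih hx'
      simp only [List.cons_append, pairSumR] at *
      rw [this]; ring

lemma digitChar_toNat (d : Nat) (h : d < 10) : (Nat.digitChar d).toNat = d + 48 := by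
  interval_cases d <;> rfl

lemma toDigits_getLast? (m : Nat) :
    (Nat.toDigits 10 m).getLast? = some (Nat.digitChar (m % 10)) := by
  by_cases h : m < 10
  · rw [Nat.toDigits_of_lt_base h, Nat.mod_eq_of_lt h]; rfl
  · rw [Nat.toDigits_of_base_le (by norm_num) (Nat.le_of_not_lt h)]
    simp

lemma A_eq_pairSum (m : Nat) : digit_distance (m : Int) = pairSumR (Nat.toDigits 10 m) := by
  induction m using Nat.strong_induction_on with
  | _ m ih =>
    by_cases h : m < 10
    · rw [digit_distance, dif_pos (by exact_mod_cast h), Nat.toDigits_of_lt_base h]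
      simp [pairSumR]
    · rw [digit_distance, dif_neg (by omega : ¬ ((m : Int) < 10))]
      have h10 : (0:Int) < 10 := by norm_num
      have hdiv : PySem.Int.floordiv (m : Int) 10 = ((m / 10 : Nat) : Int) := by
        rw [PySem.Int.floordiv_eq_ediv_of_pos h10]; omega
      have hmod : PySem.Int.mod (m : Int) 10 = ((m % 10 : Nat) : Int) := by
        rw [PySem.Int.mod_eq_emod_of_pos h10]; omega
      have hmod2 : PySem.Int.mod ((m / 10 : Nat) : Int) 10 = ((m / 10 % 10 : Nat) : Int) := by
        rw [PySem.Int.mod_eq_emod_of_pos h10]; omega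
      have hrec := ih (m / 10) (by omega)
      have hRHS : pairSumR (Nat.toDigits 10 m)
          = pairSumR (Nat.toDigits 10 (m / 10))
            + |((m / 10 % 10 : Nat) : Int) - ((m % 10 : Nat) : Int)| := by
        rw [Nat.toDigits_of_base_le (by norm_num) (Nat.le_of_not_lt h),
          pairSumR_append _ _ _ (toDigits_getLast? (m / 10)),
          digitChar_toNat _ (Nat.mod_lt _ (by norm_num)),
          digitChar_toNat _ (Nat.mod_lt _ (by norm_num))]
        congr 1
        congr 1
        push_cast
        ring
      rw [hRHS]
      simp only [hdiv, hmod, hmod2]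
      split_ifs with h2
      · have e : ((m / 10 : Nat) : Int) = ((m / 10 % 10 : Nat) : Int) := by omega
        rw [hrec, e]
        ring
      · rw [hrec]
        ring

lemma B_eq_pairSum (m : Nat) (h : 10 ≤ m) :
    digit_distance_alt (m : Int) = pairSumR (Nat.toDigits 10 m) := by
  unfold digit_distance_alt
  rw [if_neg (by omega : ¬ ((m : Int) < 10))]
  have hchars : PySem.Int.toChars (m : Int) = Nat.toDigits 10 m := by
    unfold PySem.Int.toChars
    rw [if_neg (by omega : ¬ ((m : Int) < 0))]
    simp
  simp only [hchars]
  rw [foldl_pairSumR]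
  ring

-- ===== VERDICT (by name: the statement is the Claim_ definition above) =====
theorem digit_distance_spec : Claim_equal_digit_distance := by
  intro n _
  unfold Spec_digit_distance
  by_cases h : n < 10
  · rw [digit_distance, dif_pos h, digit_distance_alt, if_pos h]
  · have hn : n = ((n.toNat : Nat) : Int) := by omega
    rw [hn, A_eq_pairSum, B_eq_pairSum _ (by omega)]
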